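-- pv_equiv track=rewrite | github.com/Kevinwu901113/ano-rag | doc/chunker.py | _are_events_related
-- ===== SOURCE A (Python) =====
-- from typing import List, Dict, Any, Optional, Union
--
-- def _are_events_related(events1: List[str], events2: List[str]) -> bool:
--     """判断两组事件是否相关"""
--     # 定义事件关联规则
--     related_pairs = {
--         ('acquisition', 'ownership'),
--         ('succession', 'ownership'),
--         ('merger', 'acquisition'),
--         ('bankruptcy', 'acquisition'),
--         ('partnership', 'merger')
--     }
--
--     for event1 in events1:
--         for event2 in events2:
--             if event1 == event2:  # 同类事件
--                 return True
--             if (event1, event2) in related_pairs or (event2, event1) in related_pairs: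
--                 return True
--
--     return False
-- ===== SOURCE B (Python) =====
-- def _are_events_related(events1, events2):
--     related_pairs = [
--         ('acquisition', 'ownership'),
--         ('succession', 'ownership'),
--         ('merger', 'acquisition'),
--         ('bankruptcy', 'acquisition'),
--         ('partnership', 'merger'),
--     ]
--     adj = {}
--     for a, b in related_pairs:
--         adj.setdefault(a, set()).add(b)
--         adj.setdefault(b, set()).add(a)
--     set2 = set(events2)
--     for e1 in events1:
--         if (adj.get(e1, set()) | {e1}) & set2:
--             return True
--     return False
-- ===== Notes on version B (the rewrite author's own statement) =====
-- stated objective: alternative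
-- what changed: Replaced A's nested scan comparing every (event1, event2) pair against the pair set with an undirected adjacency dict built once from related_pairs, a set of events2, and a single per-event1 set-intersection test of (neighbours(e1) | {e1}) with set(events2).
import Mathlib
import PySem

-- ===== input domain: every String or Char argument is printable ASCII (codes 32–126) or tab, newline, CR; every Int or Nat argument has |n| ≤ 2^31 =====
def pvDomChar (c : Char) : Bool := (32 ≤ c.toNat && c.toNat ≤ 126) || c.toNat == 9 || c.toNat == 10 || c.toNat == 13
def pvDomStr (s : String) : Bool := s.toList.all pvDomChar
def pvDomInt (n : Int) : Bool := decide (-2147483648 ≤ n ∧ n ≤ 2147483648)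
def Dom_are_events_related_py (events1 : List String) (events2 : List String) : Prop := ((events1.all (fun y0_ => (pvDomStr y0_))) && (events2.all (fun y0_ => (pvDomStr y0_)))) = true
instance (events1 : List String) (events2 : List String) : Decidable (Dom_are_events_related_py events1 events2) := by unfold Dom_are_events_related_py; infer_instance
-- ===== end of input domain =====

-- B replaces A's nested pairwise scan by an adjacency index over the fixed relation
-- table plus one set-intersection test per event of events1 (objective: alternative).

-- ===== PORT A =====
-- the set literal 'related_pairs'
def pvRelatedPairs : PySem.Set (String × String) :=
  PySem.Set.ofList
    [("acquisition", "ownership"),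
     ("succession", "ownership"),
     ("merger", "acquisition"),
     ("bankruptcy", "acquisition"),
     ("partnership", "merger")]

-- nested for-loops with early 'return True' / final 'return False'; as the result is a Bool this is List.any
def are_events_related_py (events1 : List String) (events2 : List String) : Bool :=
  events1.any (fun event1 =>
    events2.any (fun event2 =>
      (event1 == event2) ||
      (PySem.Set.contains pvRelatedPairs (event1, event2) ||
       PySem.Set.contains pvRelatedPairs (event2, event1))))

-- ===== PORT B =====
-- adjacency dict built from both orientations of every pair (Source B's first loop)
def pvAdjB : PySem.Dict String (PySem.Set String) :=
  [("acquisition", "ownership"),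
   ("succession", "ownership"),
   ("merger", "acquisition"),
   ("bankruptcy", "acquisition"),
   ("partnership", "merger")].foldl
    (fun d p =>
      let d1 := d.insert p.1 (PySem.Set.add (d.getD p.1 PySem.Set.empty) p.2)
      d1.insert p.2 (PySem.Set.add (d1.getD p.2 PySem.Set.empty) p.1))
    PySem.Dict.empty

-- 'set2 = set(events2)'; per e1: '(adj.get(e1, set()) | {e1}) & set2' nonempty
def are_events_related_py_alt (events1 : List String) (events2 : List String) : Bool :=
  let set2 := PySem.Set.ofList events2
  events1.any (fun e1 =>
    !(PySem.Set.inter (PySem.Set.union (pvAdjB.getD e1 PySem.Set.empty) [e1]) set2).isEmpty)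

-- ===== PRECONDITION & SPEC =====
def Spec_are_events_related_py (events1 : List String) (events2 : List String) (out : Bool) : Prop := out = are_events_related_py_alt events1 events2
instance (events1 : List String) (events2 : List String) (out : Bool) : Decidable (Spec_are_events_related_py events1 events2 out) := by unfold Spec_are_events_related_py; infer_instance

-- ===== CLAIM (what is proved, stated in full; the proofs are below) =====
def Claim_equal_are_events_related_py : Prop := ∀ (events1 : List String) (events2 : List String), Dom_are_events_related_py events1 events2 → Spec_are_events_related_py events1 events2 (are_events_related_py events1 events2)

-- ===== LEMMAS AND PROOFS =====

-- the adjacency fold evaluates to this literal dict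
lemma pvAdjB_eq : pvAdjB = PySem.Dict.mk
    [("acquisition", ["ownership", "merger", "bankruptcy"]),
     ("ownership", ["acquisition", "succession"]),
     ("succession", ["ownership"]),
     ("merger", ["acquisition", "partnership"]),
     ("bankruptcy", ["acquisition"]),
     ("partnership", ["merger"])] := by decide

lemma pv_pointwise (e1 e2 : String) :
    e2 ∈ PySem.Set.union (pvAdjB.getD e1 PySem.Set.empty) [e1] ↔
      ((e1 == e2) ||
       (PySem.Set.contains pvRelatedPairs (e1, e2) ||
        PySem.Set.contains pvRelatedPairs (e2, e1))) = true := by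
  rw [PySem.Set.mem_union]
  simp only [Bool.or_eq_true, beq_iff_eq, PySem.Set.contains_iff, pvRelatedPairs,
    PySem.Set.mem_ofList, List.mem_cons, List.not_mem_nil, or_false, Prod.mk.injEq]
  by_cases h1 : ("acquisition" : String) = e1 <;>
  by_cases h2 : ("ownership" : String) = e1 <;>
  by_cases h3 : ("succession" : String) = e1 <;>
  by_cases h4 : ("merger" : String) = e1 <;>
  by_cases h5 : ("bankruptcy" : String) = e1 <;>
  by_cases h6 : ("partnership" : String) = e1 <;>
  first
    | (exfalso; subst_vars; simp_all; done)
    | (subst_vars;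
       simp only [pvAdjB_eq, PySem.Dict.getD, PySem.Dict.get?_mk_cons, beq_iff_eq,
         if_true, Option.getD_some, List.mem_cons,
         List.not_mem_nil, or_false];
       constructor <;> intro h <;> rcases h with h|h|h|h|h|h|h|h|h <;> simp_all <;> done)
    | (rw [pvAdjB_eq];
       simp only [PySem.Dict.getD, PySem.Dict.get?_mk_cons, beq_iff_eq,
         if_neg h1, if_neg h2, if_neg h3, if_neg h4, if_neg h5, if_neg h6];
       simp only [PySem.Dict.get?, List.find?_nil, Option.map_none, Option.getD_none,
         PySem.Set.empty, List.not_mem_nil, false_or];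
       constructor
       · intro h; exact Or.inl h.symm
       · intro h
         rcases h with h|h|h
         · exact h.symm
         · rcases h with ⟨h,_⟩|⟨h,_⟩|⟨h,_⟩|⟨h,_⟩|⟨h,_⟩ <;> exact absurd h.symm (by assumption)
         · rcases h with ⟨_,h⟩|⟨_,h⟩|⟨_,h⟩|⟨_,h⟩|⟨_,h⟩ <;> exact absurd h.symm (by assumption))

-- per e1: A's inner scan over events2 equals B's nonempty-intersection test
lemma pv_inner (e1 : String) (events2 : List String) :
    events2.any (fun e2 =>
      (e1 == e2) ||
      (PySem.Set.contains pvRelatedPairs (e1, e2) ||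
       PySem.Set.contains pvRelatedPairs (e2, e1))) =
    !(PySem.Set.inter (PySem.Set.union (pvAdjB.getD e1 PySem.Set.empty) [e1])
        (PySem.Set.ofList events2)).isEmpty := by
  rw [Bool.eq_iff_iff]
  simp only [List.any_eq_true, Bool.not_eq_true', List.isEmpty_eq_false_iff_exists_mem,
    PySem.Set.mem_inter, PySem.Set.mem_ofList]
  constructor
  · rintro ⟨e2, h2, hck⟩
    exact ⟨e2, (pv_pointwise e1 e2).mpr hck, h2⟩
  · rintro ⟨e2, hn, h2⟩
    exact ⟨e2, h2, (pv_pointwise e1 e2).mp hn⟩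

-- ===== VERDICT (by name: the statement is the Claim_ definition above) =====
theorem are_events_related_py_spec : Claim_equal_are_events_related_py := by
  intro events1 events2 _
  unfold Spec_are_events_related_py are_events_related_py are_events_related_py_alt
  exact List.any_congr rfl (fun e1 => pv_inner e1 events2)
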